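-- pv_equiv track=rewrite | github.com/tatycalixto/Python | Exercicios funções - Alunos/kahoot.py | funcaoEnigma3
-- ===== SOURCE A (Python) =====
-- def funcaoEnigma3(n):
--     soma = 0
--     for i in range(1, n+1):
--         soma = soma+i
--     j = 1
--     while j <= n:
--         soma = soma-j
--         j = j+1
--     return soma
-- ===== SOURCE B (Python) =====
-- def funcaoEnigma3(n):
--     # The loop adds 1..n and then subtracts 1..n: the result is always 0.
--     return 0
-- ===== Notes on version B (the rewrite author's own statement) =====
-- stated objective: faster
-- what changed: Replaced the add-then-subtract O(n) loops by the closed form 0, since the two loops cancel exactly.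
import Mathlib
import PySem

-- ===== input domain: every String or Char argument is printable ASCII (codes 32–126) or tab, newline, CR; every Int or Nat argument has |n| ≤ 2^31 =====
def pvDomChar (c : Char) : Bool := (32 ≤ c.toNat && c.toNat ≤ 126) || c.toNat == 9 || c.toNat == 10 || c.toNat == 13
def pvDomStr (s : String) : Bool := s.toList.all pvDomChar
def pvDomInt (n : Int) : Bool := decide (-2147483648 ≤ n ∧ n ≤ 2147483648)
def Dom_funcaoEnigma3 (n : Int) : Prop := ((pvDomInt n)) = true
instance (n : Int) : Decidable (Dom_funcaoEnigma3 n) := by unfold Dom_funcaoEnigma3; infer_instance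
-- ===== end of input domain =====

-- B replaces A's add-then-subtract O(n) loops by the closed form 0 (the loops cancel exactly).

-- ===== PORT A =====
-- the while loop 'while j <= n: soma = soma - j; j = j + 1'
def pvWhileA (n j soma : Int) : Int :=
  if _h : j ≤ n then pvWhileA n (j + 1) (soma - j) else soma
termination_by (n + 1 - j).toNat
decreasing_by omega

def funcaoEnigma3 (n : Int) : Int :=
  let soma := (PySem.List.pyRange 1 (n + 1) 1).foldl (fun acc i => acc + i) 0
  pvWhileA n 1 soma

-- ===== PORT B =====
def funcaoEnigma3_alt (n : Int) : Int := 0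

-- ===== PRECONDITION & SPEC =====
def Spec_funcaoEnigma3 (n : Int) (out : Int) : Prop := out = funcaoEnigma3_alt n
instance (n : Int) (out : Int) : Decidable (Spec_funcaoEnigma3 n out) := by unfold Spec_funcaoEnigma3; infer_instance

-- ===== CLAIM (what is proved, stated in full; the proofs are below) =====
def Claim_equal_funcaoEnigma3 : Prop := ∀ (n : Int), Dom_funcaoEnigma3 n → Spec_funcaoEnigma3 n (funcaoEnigma3 n)

-- ===== LEMMAS AND PROOFS =====
lemma pvWhileA_eq (n j s : Int) :
    pvWhileA n j s = s - (PySem.List.pyRange j (n + 1) 1).sum := by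
  unfold pvWhileA
  split
  · rename_i h
    rw [pvWhileA_eq n (j + 1) (s - j),
        PySem.List.pyRange_one_cons (by omega : j < n + 1)]
    simp [List.sum_cons]
    ring
  · rename_i h
    rw [PySem.List.pyRange_one_eq_nil (by omega : n + 1 ≤ j)]
    simp
termination_by (n + 1 - j).toNat
decreasing_by omega

-- ===== VERDICT (by name: the statement is the Claim_ definition above) =====
theorem funcaoEnigma3_spec : Claim_equal_funcaoEnigma3 := by
  intro n _
  show funcaoEnigma3 n = funcaoEnigma3_alt n
  unfold funcaoEnigma3 funcaoEnigma3_alt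
  rw [pvWhileA_eq]
  have := PySem.List.foldl_add (l := PySem.List.pyRange 1 (n + 1) 1) (a := (0:Int)) (g := fun x => x)
  simp only [this]
  simp [List.map_id']
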